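-- pv_equiv track=rewrite | github.com/Stanford-BIS/pystorm | pystorm/test/test_hal_decode_2core.py | filter_tags
-- ===== SOURCE A (Python) =====
-- def filter_tags(tags):
--     times_and_cts = {}
--     for t, output_id, dim, ct in tags:
--         if output_id not in times_and_cts:
--             times_and_cts[output_id] = {}
--         if dim not in times_and_cts[output_id]:
--             times_and_cts[output_id][dim] = []
--         times_and_cts[output_id][dim].append((t, ct))
--     return times_and_cts
-- ===== SOURCE B (Python) =====
-- def filter_tags(tags):
--     return {oid: {dim: [(t, ct) for t, o, d, ct in tags if o == oid and d == dim]
--                   for dim in dict.fromkeys(d for _, o, d, _ in tags if o == oid)}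
--             for oid in dict.fromkeys(oid for _, oid, _, _ in tags)}
-- ===== Notes on version B (the rewrite author's own statement) =====
-- stated objective: simpler
-- what changed: Replaces the single-pass nested-dict mutation loop by a declarative nested comprehension: dedup the output_ids (dict.fromkeys), per id dedup its dims, and build each leaf list by filtering the input; O(n^2) scans instead of one pass, but shorter and side-effect free.
import Mathlib
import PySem

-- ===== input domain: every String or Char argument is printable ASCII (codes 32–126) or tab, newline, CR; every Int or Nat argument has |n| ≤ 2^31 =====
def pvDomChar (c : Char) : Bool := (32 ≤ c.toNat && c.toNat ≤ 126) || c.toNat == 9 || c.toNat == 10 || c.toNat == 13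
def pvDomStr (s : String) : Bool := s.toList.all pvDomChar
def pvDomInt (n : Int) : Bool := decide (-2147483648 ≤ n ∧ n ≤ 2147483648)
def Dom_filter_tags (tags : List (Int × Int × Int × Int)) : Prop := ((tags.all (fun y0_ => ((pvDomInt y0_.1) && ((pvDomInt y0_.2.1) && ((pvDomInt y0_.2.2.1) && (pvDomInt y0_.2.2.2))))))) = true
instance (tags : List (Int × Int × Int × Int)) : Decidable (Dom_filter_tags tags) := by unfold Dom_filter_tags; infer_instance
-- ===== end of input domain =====

-- B replaces A's single-pass nested-dict mutation loop by a declarative dedup-and-filter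
-- nested comprehension (simpler to read; not faster).


-- ===== PORT A =====
-- one iteration of A's loop body (membership tests, then append via insert)
def filterTagsStepA (d : PySem.Dict Int (PySem.Dict Int (List (Int × Int))))
    (x : Int × Int × Int × Int) : PySem.Dict Int (PySem.Dict Int (List (Int × Int))) :=
  let t := x.1; let oid := x.2.1; let dim := x.2.2.1; let ct := x.2.2.2
  let d := if d.contains oid then d else d.insert oid PySem.Dict.empty
  let inner := d.getD oid PySem.Dict.empty
  let inner := if inner.contains dim then inner else inner.insert dim []
  let inner := inner.insert dim (inner.getD dim [] ++ [(t, ct)])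
  d.insert oid inner

def filter_tags (tags : List (Int × Int × Int × Int)) : List (Int × List (Int × List (Int × Int))) :=
  let times_and_cts := tags.foldl filterTagsStepA PySem.Dict.empty
  times_and_cts.items.map (fun p => (p.1, p.2.items))

-- ===== PORT B =====
def filter_tags_alt (tags : List (Int × Int × Int × Int)) : List (Int × List (Int × List (Int × Int))) :=
  (PySem.List.dedup (tags.map (fun x => x.2.1))).map (fun oid =>
    (oid, (PySem.List.dedup ((tags.filter (fun x => x.2.1 == oid)).map (fun x => x.2.2.1))).map (fun dim =>
      (dim, (tags.filter (fun x => x.2.1 == oid && x.2.2.1 == dim)).map (fun x => (x.1, x.2.2.2))))))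

-- ===== PRECONDITION & SPEC =====
def Spec_filter_tags (tags : List (Int × Int × Int × Int)) (out : List (Int × List (Int × List (Int × Int)))) : Prop := out = filter_tags_alt tags
instance (tags : List (Int × Int × Int × Int)) (out : List (Int × List (Int × List (Int × Int)))) : Decidable (Spec_filter_tags tags out) := by unfold Spec_filter_tags; infer_instance

-- ===== CLAIM (what is proved, stated in full; the proofs are below) =====
def Claim_equal_filter_tags : Prop := ∀ (tags : List (Int × Int × Int × Int)), Dom_filter_tags tags → Spec_filter_tags tags (filter_tags tags)

-- ===== LEMMAS AND PROOFS =====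

-- A's loop body is a nested Dict.modify (append under (oid, dim))
theorem filterTagsStepA_eq_modify (d : PySem.Dict Int (PySem.Dict Int (List (Int × Int))))
    (x : Int × Int × Int × Int) :
    filterTagsStepA d x =
      d.modify x.2.1 PySem.Dict.empty
        (fun inner => inner.modify x.2.2.1 [] (fun l => l ++ [(x.1, x.2.2.2)])) := by
  obtain ⟨t, oid, dim, ct⟩ := x
  simp only [filterTagsStepA, PySem.Dict.modify]
  by_cases ho : d.contains oid
  · simp only [ho, if_true]
    by_cases hd : (d.getD oid PySem.Dict.empty).contains dim
    · simp [hd]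
    · simp [hd, PySem.Dict.getD_insert_self, PySem.Dict.insert_insert_self,
        PySem.Dict.getD_of_not_contains _ _ (by simpa using hd)]
  · have ho' : d.contains oid = false := by simpa using ho
    simp [ho', PySem.Dict.getD_insert_self, PySem.Dict.insert_insert_self,
      PySem.Dict.getD_of_not_contains _ _ ho',
      PySem.Dict.contains_empty, PySem.Dict.getD_empty]

-- getD through a fold of modify keyed by `key x`: only the matching elements act
theorem getD_foldl_modify_key {κ ν β : Type} [BEq κ] [LawfulBEq κ]
    (l : List β) (key : β → κ) (d0 : ν) (f : β → ν → ν)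
    (d : PySem.Dict κ ν) (c : κ) :
    (l.foldl (fun d x => d.modify (key x) d0 (f x)) d).getD c d0 =
      (l.filter (fun x => key x == c)).foldl (fun v x => f x v) (d.getD c d0) := by
  induction l generalizing d with
  | nil => rfl
  | cons x l ih =>
    simp only [List.foldl_cons, List.filter_cons]
    by_cases h : key x = c
    · subst h
      simp [ih, PySem.Dict.getD_modify_self]
    · have hb : (key x == c) = false := by simpa using h
      rw [hb]
      simp only [Bool.false_eq_true, if_false, ih,
        PySem.Dict.getD_modify_of_ne d d0 (f x) (fun hc => h hc.symm)]

-- the nested dict A builds, looked up at any oid, is the fold over the tags with that oid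
theorem filter_tags_getD (tags : List (Int × Int × Int × Int)) (oid : Int) :
    (tags.foldl filterTagsStepA PySem.Dict.empty).getD oid PySem.Dict.empty =
      ((tags.filter (fun x => x.2.1 == oid)).map (fun x => (x.2.2.1, (x.1, x.2.2.2)))).foldl
        (fun d p => d.modify p.1 [] (fun l => l ++ [p.2])) PySem.Dict.empty := by
  have hstep : filterTagsStepA = fun d x =>
      d.modify x.2.1 PySem.Dict.empty
        (fun inner => inner.modify x.2.2.1 [] (fun l => l ++ [(x.1, x.2.2.2)])) := by
    funext d x; exact filterTagsStepA_eq_modify d x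
  rw [hstep, getD_foldl_modify_key tags (fun x => x.2.1) PySem.Dict.empty
    (fun x inner => inner.modify x.2.2.1 [] (fun l => l ++ [(x.1, x.2.2.2)])) _ oid]
  simp [List.foldl_map, PySem.Dict.getD_empty]

theorem filter_tags_keys (tags : List (Int × Int × Int × Int)) :
    (tags.foldl filterTagsStepA PySem.Dict.empty).keys =
      PySem.List.dedup (tags.map (fun x => x.2.1)) := by
  have hstep : filterTagsStepA = fun d x =>
      d.modify x.2.1 PySem.Dict.empty
        (fun inner => inner.modify x.2.2.1 [] (fun l => l ++ [(x.1, x.2.2.2)])) := by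
    funext d x; exact filterTagsStepA_eq_modify d x
  rw [hstep, PySem.Dict.keys_foldl_modify_key tags (fun x => x.2.1) PySem.Dict.empty
    (fun _ x inner => inner.modify x.2.2.1 [] (fun l => l ++ [(x.1, x.2.2.2)])) PySem.Dict.empty]
  rfl

theorem filter_tags_nodup_keys (tags : List (Int × Int × Int × Int)) :
    (tags.foldl filterTagsStepA PySem.Dict.empty).keys.Nodup := by
  have hstep : filterTagsStepA = fun d x =>
      d.modify x.2.1 PySem.Dict.empty
        (fun inner => inner.modify x.2.2.1 [] (fun l => l ++ [(x.1, x.2.2.2)])) := by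
    funext d x; exact filterTagsStepA_eq_modify d x
  rw [hstep]
  exact PySem.Dict.nodup_keys_foldl_modify_key tags (fun x => x.2.1) PySem.Dict.empty
    (fun _ x inner => inner.modify x.2.2.1 [] (fun l => l ++ [(x.1, x.2.2.2)]))
    PySem.Dict.empty (by simp [PySem.Dict.empty, PySem.Dict.keys])

-- the inner dict at oid: keys and values
theorem filter_tags_inner_keys (tags : List (Int × Int × Int × Int)) (oid : Int) :
    ((tags.foldl filterTagsStepA PySem.Dict.empty).getD oid PySem.Dict.empty).keys =
      PySem.List.dedup ((tags.filter (fun x => x.2.1 == oid)).map (fun x => x.2.2.1)) := by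
  rw [filter_tags_getD]
  rw [PySem.Dict.keys_foldl_modify_key
    ((tags.filter (fun x => x.2.1 == oid)).map (fun x => (x.2.2.1, (x.1, x.2.2.2))))
    (fun (p : Int × (Int × Int)) => p.1) ([] : List (Int × Int))
    (fun _ (p : Int × (Int × Int)) l => l ++ [p.2]) PySem.Dict.empty]
  simp [PySem.List.dedup, List.map_map, PySem.Set.update, PySem.Dict.keys,
    PySem.Dict.empty, PySem.Set.ofList, Function.comp_def]

theorem filter_tags_inner_nodup (tags : List (Int × Int × Int × Int)) (oid : Int) :
    ((tags.foldl filterTagsStepA PySem.Dict.empty).getD oid PySem.Dict.empty).keys.Nodup := by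
  rw [filter_tags_getD]
  exact PySem.Dict.nodup_keys_foldl_modify_key
    ((tags.filter (fun x => x.2.1 == oid)).map (fun x => (x.2.2.1, (x.1, x.2.2.2))))
    (fun (p : Int × (Int × Int)) => p.1) ([] : List (Int × Int))
    (fun _ (p : Int × (Int × Int)) l => l ++ [p.2]) PySem.Dict.empty
    (by simp [PySem.Dict.empty, PySem.Dict.keys])

theorem filter_tags_inner_getD (tags : List (Int × Int × Int × Int)) (oid dim : Int) :
    (((tags.foldl filterTagsStepA PySem.Dict.empty).getD oid PySem.Dict.empty).getD dim []) =
      (tags.filter (fun x => x.2.1 == oid && x.2.2.1 == dim)).map (fun x => (x.1, x.2.2.2)) := by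
  rw [filter_tags_getD, PySem.Dict.getD_foldl_modify_append]
  rw [List.filter_map, List.filter_filter]
  simp only [PySem.Dict.getD_empty, List.nil_append, List.map_map]
  congr 1
  apply List.filter_congr
  intro x _
  simp [Function.comp, Bool.and_comm]

-- ===== VERDICT (by name: the statement is the Claim_ definition above) =====
theorem filter_tags_spec : Claim_equal_filter_tags := by
  intro tags _
  show List.map (fun p => (p.1, p.2.items)) (tags.foldl filterTagsStepA PySem.Dict.empty).items
      = filter_tags_alt tags
  unfold filter_tags_alt
  rw [PySem.Dict.items_eq_map_keys _ (filter_tags_nodup_keys tags) PySem.Dict.empty,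
    List.map_map, filter_tags_keys]
  apply List.map_congr_left
  intro oid _
  simp only [Function.comp]
  refine congrArg (fun l => (oid, l)) ?_
  rw [PySem.Dict.items_eq_map_keys _ (filter_tags_inner_nodup tags oid) ([] : List (Int × Int)),
    filter_tags_inner_keys]
  apply List.map_congr_left
  intro dim _
  exact congrArg (fun l => (dim, l)) (filter_tags_inner_getD tags oid dim)
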